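-- pv_equiv track=rewrite | github.com/Orlandovpjunior/AlgoritmosAvancados | respostasLista4/AyyoubLostArray.py | count_valid_arrays
-- ===== SOURCE A (Python) =====
-- MOD = 10**9 + 7
--
-- def count_valid_arrays(n, l, r):
--     count = [0, 0, 0]
--
--     count[0] = (r // 3) - ((l - 1) // 3)
--     count[1] = ((r + 2) // 3) - ((l + 1) // 3)
--     count[2] = ((r + 1) // 3) - (l // 3)
--
--     dp = [0] * 3
--     dp[0] = count[0]
--     dp[1] = count[1]
--     dp[2] = count[2]
--
--     for _ in range(n - 1):
--         new_dp = [0] * 3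
--         new_dp[0] = (dp[0] * count[0] + dp[1] * count[2] + dp[2] * count[1]) % MOD
--         new_dp[1] = (dp[0] * count[1] + dp[1] * count[0] + dp[2] * count[2]) % MOD
--         new_dp[2] = (dp[0] * count[2] + dp[1] * count[1] + dp[2] * count[0]) % MOD
--         dp = new_dp
--
--     return dp[0]
-- ===== SOURCE B (Python) =====
-- MOD = 10**9 + 7
--
-- def count_valid_arrays(n, l, r):
--     c0 = (r // 3) - ((l - 1) // 3)
--     c1 = ((r + 2) // 3) - ((l + 1) // 3)
--     c2 = ((r + 1) // 3) - (l // 3)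
--     if n <= 1:
--         return c0
--     # dp after n-1 transitions equals c^n in Z[x]/(x^3-1), coefficients mod MOD;
--     # compute that power by binary exponentiation of the cyclic convolution.
--     def mul(a, b):
--         return ((a[0] * b[0] + a[1] * b[2] + a[2] * b[1]) % MOD,
--                 (a[0] * b[1] + a[1] * b[0] + a[2] * b[2]) % MOD,
--                 (a[0] * b[2] + a[1] * b[1] + a[2] * b[0]) % MOD)
--     def pw(b, k):
--         if k == 0:
--             return (1, 0, 0)
--         h = pw(mul(b, b), k // 2)
--         return mul(b, h) if k % 2 == 1 else h
--     return pw((c0 % MOD, c1 % MOD, c2 % MOD), n)[0]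
-- ===== Notes on version B (the rewrite author's own statement) =====
-- stated objective: faster
-- what changed: A iterates the residue-class DP transition n-1 times; B recognises the transition as multiplication by a fixed element of Z[x]/(x^3-1) (a 3x3 circulant) and computes c^n by binary exponentiation of the cyclic convolution.
import Mathlib
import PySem

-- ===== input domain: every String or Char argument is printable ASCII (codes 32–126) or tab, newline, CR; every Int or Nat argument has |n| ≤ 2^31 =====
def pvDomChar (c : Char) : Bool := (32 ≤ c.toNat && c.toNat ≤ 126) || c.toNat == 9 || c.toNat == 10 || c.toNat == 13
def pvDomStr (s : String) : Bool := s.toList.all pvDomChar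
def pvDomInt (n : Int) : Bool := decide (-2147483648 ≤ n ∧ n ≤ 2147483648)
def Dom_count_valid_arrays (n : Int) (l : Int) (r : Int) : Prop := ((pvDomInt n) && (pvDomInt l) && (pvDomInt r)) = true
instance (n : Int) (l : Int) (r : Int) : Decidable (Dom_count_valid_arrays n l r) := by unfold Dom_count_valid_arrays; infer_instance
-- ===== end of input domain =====

-- B replaces A's n-1 step-by-step DP iterations by binary exponentiation in Z[x]/(x^3-1)
-- (cyclic convolution), an asymptotically faster (O(log n)) exact re-implementation.

-- ===== PORT A =====
def pvCounts (l r : Int) : Int × Int × Int :=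
  (PySem.Int.floordiv r 3 - PySem.Int.floordiv (l - 1) 3,
   PySem.Int.floordiv (r + 2) 3 - PySem.Int.floordiv (l + 1) 3,
   PySem.Int.floordiv (r + 1) 3 - PySem.Int.floordiv l 3)

-- one iteration of A's loop body (dp ↦ new_dp), with Python's '%'
def pvStepA (c dp : Int × Int × Int) : Int × Int × Int :=
  (PySem.Int.mod (dp.1 * c.1 + dp.2.1 * c.2.2 + dp.2.2 * c.2.1) 1000000007,
   PySem.Int.mod (dp.1 * c.2.1 + dp.2.1 * c.1 + dp.2.2 * c.2.2) 1000000007,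
   PySem.Int.mod (dp.1 * c.2.2 + dp.2.1 * c.2.1 + dp.2.2 * c.1) 1000000007)

def count_valid_arrays (n : Int) (l : Int) (r : Int) : Int :=
  let c := pvCounts l r
  ((pvStepA c)^[(n - 1).toNat] c).1

-- ===== PORT B =====
-- Source B's mul: cyclic convolution mod 10^9+7
def pvMulB (a b : Int × Int × Int) : Int × Int × Int :=
  (PySem.Int.mod (a.1 * b.1 + a.2.1 * b.2.2 + a.2.2 * b.2.1) 1000000007,
   PySem.Int.mod (a.1 * b.2.1 + a.2.1 * b.1 + a.2.2 * b.2.2) 1000000007,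
   PySem.Int.mod (a.1 * b.2.2 + a.2.1 * b.2.1 + a.2.2 * b.1) 1000000007)

-- Source B's pw: binary exponentiation
def pvPowB (b : Int × Int × Int) (k : Nat) : Int × Int × Int :=
  if h : k = 0 then (1, 0, 0)
  else
    let hh := pvPowB (pvMulB b b) (k / 2)
    if k % 2 = 1 then pvMulB b hh else hh
termination_by k
decreasing_by omega

def count_valid_arrays_alt (n : Int) (l : Int) (r : Int) : Int :=
  let c := pvCounts l r
  if n ≤ 1 then c.1
  else (pvPowB (PySem.Int.mod c.1 1000000007, PySem.Int.mod c.2.1 1000000007,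
                PySem.Int.mod c.2.2 1000000007) n.toNat).1

-- ===== PRECONDITION & SPEC =====
def Spec_count_valid_arrays (n : Int) (l : Int) (r : Int) (out : Int) : Prop := out = count_valid_arrays_alt n l r
instance (n : Int) (l : Int) (r : Int) (out : Int) : Decidable (Spec_count_valid_arrays n l r out) := by unfold Spec_count_valid_arrays; infer_instance

-- ===== CLAIM (what is proved, stated in full; the proofs are below) =====
def Claim_equal_count_valid_arrays : Prop := ∀ (n : Int) (l : Int) (r : Int), Dom_count_valid_arrays n l r → Spec_count_valid_arrays n l r (count_valid_arrays n l r)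

-- ===== LEMMAS AND PROOFS =====

-- pure cyclic convolution (no mod): the common algebra both programs compute in
def pvCmul (a b : Int × Int × Int) : Int × Int × Int :=
  (a.1 * b.1 + a.2.1 * b.2.2 + a.2.2 * b.2.1,
   a.1 * b.2.1 + a.2.1 * b.1 + a.2.2 * b.2.2,
   a.1 * b.2.2 + a.2.1 * b.2.1 + a.2.2 * b.1)

def pvPow (b : Int × Int × Int) : Nat → Int × Int × Int
  | 0 => (1, 0, 0)
  | k + 1 => pvCmul b (pvPow b k)

-- componentwise congruence mod 10^9+7
def pvEqv (a b : Int × Int × Int) : Prop :=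
  a.1 ≡ b.1 [ZMOD 1000000007] ∧ a.2.1 ≡ b.2.1 [ZMOD 1000000007] ∧ a.2.2 ≡ b.2.2 [ZMOD 1000000007]

-- componentwise reducedness: x % M = x
def pvRed (a : Int × Int × Int) : Prop :=
  a.1 % 1000000007 = a.1 ∧ a.2.1 % 1000000007 = a.2.1 ∧ a.2.2 % 1000000007 = a.2.2

theorem pvMod_eq (x : Int) : PySem.Int.mod x 1000000007 = x % 1000000007 :=
  PySem.Int.mod_eq_emod_of_pos (by norm_num)

theorem pvEqv_refl (a : Int × Int × Int) : pvEqv a a := ⟨Int.ModEq.refl _, Int.ModEq.refl _, Int.ModEq.refl _⟩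

theorem pvEqv_trans {a b c : Int × Int × Int} (h1 : pvEqv a b) (h2 : pvEqv b c) : pvEqv a c :=
  ⟨h1.1.trans h2.1, h1.2.1.trans h2.2.1, h1.2.2.trans h2.2.2⟩

theorem pvCmul_congr {a a' b b' : Int × Int × Int} (ha : pvEqv a a') (hb : pvEqv b b') :
    pvEqv (pvCmul a b) (pvCmul a' b') := by
  exact ⟨((ha.1.mul hb.1).add (ha.2.1.mul hb.2.2)).add (ha.2.2.mul hb.2.1),
         ((ha.1.mul hb.2.1).add (ha.2.1.mul hb.1)).add (ha.2.2.mul hb.2.2),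
         ((ha.1.mul hb.2.2).add (ha.2.1.mul hb.2.1)).add (ha.2.2.mul hb.1)⟩

-- reducing each component is a congruence-preserving map with reduced output
theorem pvMod_modEq (x : Int) : x % 1000000007 ≡ x [ZMOD 1000000007] := Int.emod_emod_of_dvd x dvd_rfl

theorem pvStepA_eqv (c dp : Int × Int × Int) : pvEqv (pvStepA c dp) (pvCmul dp c) := by
  refine ⟨?_, ?_, ?_⟩ <;> · simp only [pvStepA, pvCmul, pvMod_eq]; exact pvMod_modEq _

theorem pvMulB_eqv (a b : Int × Int × Int) : pvEqv (pvMulB a b) (pvCmul a b) := by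
  refine ⟨?_, ?_, ?_⟩ <;> · simp only [pvMulB, pvCmul, pvMod_eq]; exact pvMod_modEq _

theorem pvStepA_red (c dp : Int × Int × Int) : pvRed (pvStepA c dp) := by
  refine ⟨?_, ?_, ?_⟩ <;> · simp only [pvStepA, pvMod_eq]; exact Int.emod_emod_of_dvd _ dvd_rfl

theorem pvMulB_red (a b : Int × Int × Int) : pvRed (pvMulB a b) := by
  refine ⟨?_, ?_, ?_⟩ <;> · simp only [pvMulB, pvMod_eq]; exact Int.emod_emod_of_dvd _ dvd_rfl

theorem pvCmul_comm (a b : Int × Int × Int) : pvCmul a b = pvCmul b a := by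
  obtain ⟨a1, a2, a3⟩ := a; obtain ⟨b1, b2, b3⟩ := b
  unfold pvCmul; refine Prod.ext (by ring) (Prod.ext (by ring) (by ring))

theorem pvCmul_assoc (a b c : Int × Int × Int) : pvCmul (pvCmul a b) c = pvCmul a (pvCmul b c) := by
  obtain ⟨a1, a2, a3⟩ := a; obtain ⟨b1, b2, b3⟩ := b; obtain ⟨c1, c2, c3⟩ := c
  unfold pvCmul; refine Prod.ext (by ring) (Prod.ext (by ring) (by ring))

theorem pvPow_congr {b b' : Int × Int × Int} (h : pvEqv b b') (k : Nat) :
    pvEqv (pvPow b k) (pvPow b' k) := by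
  induction k with
  | zero => exact pvEqv_refl _
  | succ k ih => exact pvCmul_congr h ih

theorem pvPow_sq (b : Int × Int × Int) (m : Nat) : pvPow (pvCmul b b) m = pvPow b (2 * m) := by
  induction m with
  | zero => rfl
  | succ m ih =>
    have h2 : 2 * (m + 1) = (2 * m + 1) + 1 := by ring
    rw [h2]
    show pvCmul (pvCmul b b) (pvPow (pvCmul b b) m) = pvCmul b (pvPow b (2 * m + 1))
    rw [ih]
    show _ = pvCmul b (pvCmul b (pvPow b (2 * m)))
    rw [pvCmul_assoc]

-- A's loop: k iterations starting from c compute c^(k+1), reduced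
theorem pvIter_eqv (c : Int × Int × Int) (k : Nat) :
    pvEqv ((pvStepA c)^[k] c) (pvPow c (k + 1)) := by
  induction k with
  | zero =>
    show pvEqv c (pvCmul c (pvPow c 0))
    have : pvCmul c (pvPow c 0) = c := by
      obtain ⟨a1, a2, a3⟩ := c
      unfold pvCmul pvPow; refine Prod.ext (by ring) (Prod.ext (by ring) (by ring))
    rw [this]; exact pvEqv_refl _
  | succ k ih =>
    rw [Function.iterate_succ_apply']
    refine pvEqv_trans (pvStepA_eqv c _) ?_
    refine pvEqv_trans (pvCmul_congr ih (pvEqv_refl c)) ?_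
    rw [pvCmul_comm]
    exact pvEqv_refl _

-- B's binary exponentiation computes the same power (up to congruence)
theorem pvPowB_eqv (b : Int × Int × Int) (k : Nat) : pvEqv (pvPowB b k) (pvPow b k) := by
  induction k using Nat.strong_induction_on generalizing b with
  | _ k ih =>
    rw [pvPowB]
    by_cases h0 : k = 0
    · simp only [h0, dif_pos]; exact pvEqv_refl _
    · simp only [h0, dif_neg, not_false_iff]
      have hlt : k / 2 < k := by omega
      have hh : pvEqv (pvPowB (pvMulB b b) (k / 2)) (pvPow b (2 * (k / 2))) := by
        refine pvEqv_trans (ih _ hlt _) ?_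
        refine pvEqv_trans (pvPow_congr (pvMulB_eqv b b) _) ?_
        rw [pvPow_sq]; exact pvEqv_refl _
      by_cases hodd : k % 2 = 1
      · simp only [hodd, if_pos]
        obtain ⟨m, hm⟩ : ∃ m, k / 2 = m := ⟨_, rfl⟩
        rw [hm] at hh ⊢
        have hk : k = 2 * m + 1 := by omega
        subst hk
        refine pvEqv_trans (pvMulB_eqv _ _) ?_
        exact pvCmul_congr (pvEqv_refl b) hh
      · simp only [hodd, if_neg, not_false_iff]
        obtain ⟨m, hm⟩ : ∃ m, k / 2 = m := ⟨_, rfl⟩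
        rw [hm] at hh ⊢
        have hk : k = 2 * m := by omega
        subst hk
        exact hh

theorem pvPowB_red (b : Int × Int × Int) (k : Nat) (hk : 1 ≤ k) : pvRed (pvPowB b k) := by
  induction k using Nat.strong_induction_on generalizing b with
  | _ k ih =>
    rw [pvPowB]
    have h0 : ¬ k = 0 := by omega
    simp only [h0, dif_neg, not_false_iff]
    by_cases hodd : k % 2 = 1
    · simp only [hodd, if_pos]; exact pvMulB_red _ _
    · simp only [hodd, if_neg, not_false_iff]
      exact ih (k / 2) (by omega) _ (by omega)

theorem pvRed_eq {x y : Int × Int × Int} (hx : pvRed x) (hy : pvRed y) (h : pvEqv x y) : x = y := by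
  obtain ⟨x1, x2, x3⟩ := x; obtain ⟨y1, y2, y3⟩ := y
  obtain ⟨hx1, hx2, hx3⟩ := hx; obtain ⟨hy1, hy2, hy3⟩ := hy
  obtain ⟨h1, h2, h3⟩ := h
  refine Prod.ext ?_ (Prod.ext ?_ ?_) <;> simp_all [Int.ModEq]

-- ===== VERDICT (by name: the statement is the Claim_ definition above) =====
theorem count_valid_arrays_spec : Claim_equal_count_valid_arrays := by
  intro n l r _
  unfold Spec_count_valid_arrays count_valid_arrays count_valid_arrays_alt
  set c := pvCounts l r with hc
  by_cases hn : n ≤ 1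
  · have : (n - 1).toNat = 0 := by omega
    simp [this, hn]
  · simp only [hn, if_neg, not_false_iff]
    have hk : ∃ j : Nat, (n - 1).toNat = j + 1 ∧ n.toNat = j + 2 := ⟨(n - 2).toNat, by omega, by omega⟩
    obtain ⟨j, hj1, hj2⟩ := hk
    rw [hj1, hj2]
    -- A side: reduced, ≡ c^(j+2)
    have hA_red : pvRed ((pvStepA c)^[j + 1] c) := by
      rw [Function.iterate_succ_apply']; exact pvStepA_red _ _
    have hA_eqv : pvEqv ((pvStepA c)^[j + 1] c) (pvPow c (j + 2)) := pvIter_eqv c (j + 1)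
    -- B side: reduced, ≡ c^(j+2)
    set c' : Int × Int × Int := (PySem.Int.mod c.1 1000000007, PySem.Int.mod c.2.1 1000000007,
        PySem.Int.mod c.2.2 1000000007) with hc'
    have hc'_eqv : pvEqv c' c := by
      refine ⟨?_, ?_, ?_⟩ <;> · rw [hc']; simp only [pvMod_eq]; exact pvMod_modEq _
    have hB_red : pvRed (pvPowB c' (j + 2)) := pvPowB_red _ _ (by omega)
    have hB_eqv : pvEqv (pvPowB c' (j + 2)) (pvPow c (j + 2)) :=
      pvEqv_trans (pvPowB_eqv _ _) (pvPow_congr hc'_eqv _)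
    have := pvRed_eq hA_red hB_red (pvEqv_trans hA_eqv ⟨hB_eqv.1.symm, hB_eqv.2.1.symm, hB_eqv.2.2.symm⟩)
    rw [this]
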